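-- pv_equiv track=rewrite | github.com/srinivasp0451/gdp-dashboard | swingtrading20.py | choose_primary_indicator
-- ===== SOURCE A (Python) =====
-- def choose_primary_indicator(indicators_list):
--     priority = ['CUP_HANDLE','HEAD_SHOULDERS','MORNING_STAR','EVENING_STAR','BULL_ENGULF','BEAR_ENGULF',
--                 'RVOL','IMBAL_BULL','IMBAL_BEAR','DIV_BULL','DIV_BEAR','FVG_BULL','FVG_BEAR',
--                 'FLAG','SYMMETRIC_TRIANGLE','FALLING_WEDGE','RISING_WEDGE','CHANNEL',
--                 'EMA','SMA','MACD','RSI','BB','VWMA','OBV','MOM','STOCH','ADX','CCI']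
--     for p in priority:
--         for it in indicators_list:
--             if p in it:
--                 return it
--     return indicators_list[0] if indicators_list else ''
-- ===== SOURCE B (Python) =====
-- def _rank(priority, it):
--     # index of the first priority pattern contained in `it`, or len(priority) if none
--     for i, p in enumerate(priority):
--         if p in it:
--             return i
--     return len(priority)
--
-- def choose_primary_indicator(indicators_list):
--     priority = ['CUP_HANDLE','HEAD_SHOULDERS','MORNING_STAR','EVENING_STAR','BULL_ENGULF','BEAR_ENGULF',
--                 'RVOL','IMBAL_BULL','IMBAL_BEAR','DIV_BULL','DIV_BEAR','FVG_BULL','FVG_BEAR',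
--                 'FLAG','SYMMETRIC_TRIANGLE','FALLING_WEDGE','RISING_WEDGE','CHANNEL',
--                 'EMA','SMA','MACD','RSI','BB','VWMA','OBV','MOM','STOCH','ADX','CCI']
--     n = len(priority)
--     best = None
--     best_rank = n
--     for it in indicators_list:
--         r = _rank(priority, it)
--         if r < best_rank:
--             best_rank = r
--             best = it
--     if best is not None and best_rank < n:
--         return best
--     return indicators_list[0] if indicators_list else ''
-- ===== Notes on version B (the rewrite author's own statement) =====
-- stated objective: alternative
-- what changed: Replaced A's priority-outer/indicator-inner double loop with a single minimizing pass over the indicators that computes each indicator's best-matching priority rank and keeps the first indicator with the strictly smallest rank.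
import Mathlib
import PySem

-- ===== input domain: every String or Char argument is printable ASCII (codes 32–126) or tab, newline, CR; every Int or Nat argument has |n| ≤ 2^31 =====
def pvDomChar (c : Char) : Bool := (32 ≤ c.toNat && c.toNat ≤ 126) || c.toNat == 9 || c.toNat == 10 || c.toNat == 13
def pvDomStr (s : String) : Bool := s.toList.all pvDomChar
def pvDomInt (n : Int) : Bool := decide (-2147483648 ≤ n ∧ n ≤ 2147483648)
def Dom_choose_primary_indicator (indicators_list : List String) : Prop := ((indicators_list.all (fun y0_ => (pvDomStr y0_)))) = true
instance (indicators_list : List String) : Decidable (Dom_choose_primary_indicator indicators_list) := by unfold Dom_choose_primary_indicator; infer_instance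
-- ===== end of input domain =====

-- B replaces A's priority-outer/indicator-inner double loop by one minimizing pass over the
-- indicators, using a rank (first matching priority index) per indicator; alternative decomposition.

-- the module-level priority constant shared (as a literal) by both Pythons
def pvPriority : List String :=
  ["CUP_HANDLE", "HEAD_SHOULDERS", "MORNING_STAR", "EVENING_STAR", "BULL_ENGULF", "BEAR_ENGULF",
   "RVOL", "IMBAL_BULL", "IMBAL_BEAR", "DIV_BULL", "DIV_BEAR", "FVG_BULL", "FVG_BEAR",
   "FLAG", "SYMMETRIC_TRIANGLE", "FALLING_WEDGE", "RISING_WEDGE", "CHANNEL",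
   "EMA", "SMA", "MACD", "RSI", "BB", "VWMA", "OBV", "MOM", "STOCH", "ADX", "CCI"]

-- ===== PORT A =====
-- inner loop: 'for it in indicators_list: if p in it: return it'
def pvInnerA (p : String) : List String → Option String
  | [] => none
  | it :: rest => if PySem.Str.isIn p it then some it else pvInnerA p rest

-- outer loop over the priority list
def pvLoopA (prio inds : List String) : Option String :=
  match prio with
  | [] => none
  | p :: ps =>
    match pvInnerA p inds with
    | some it => some it
    | none => pvLoopA ps inds

def choose_primary_indicator (indicators_list : List String) : String :=
  match pvLoopA pvPriority indicators_list with
  | some it => it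
  | none => match indicators_list with
            | [] => ""
            | x :: _ => x

-- ===== PORT B =====
-- _rank: index of the first priority pattern contained in `it`, or len(priority) if none
def pvRank (prio : List String) (it : String) : Nat :=
  match prio with
  | [] => 0
  | p :: ps => if PySem.Str.isIn p it then 0 else pvRank ps it + 1

-- the single minimizing pass: state (best_rank, best)
def pvGoB (prio : List String) : List String → Nat → Option String → Nat × Option String
  | [], br, b => (br, b)
  | it :: rest, br, b =>
    if pvRank prio it < br then pvGoB prio rest (pvRank prio it) (some it)
    else pvGoB prio rest br b

def choose_primary_indicator_alt (indicators_list : List String) : String :=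
  let n := pvPriority.length
  match pvGoB pvPriority indicators_list n none with
  | (br, some best) =>
    if br < n then best
    else match indicators_list with
         | [] => ""
         | x :: _ => x
  | (_, none) => match indicators_list with
                 | [] => ""
                 | x :: _ => x

-- ===== PRECONDITION & SPEC =====
def Spec_choose_primary_indicator (indicators_list : List String) (out : String) : Prop := out = choose_primary_indicator_alt indicators_list
instance (indicators_list : List String) (out : String) : Decidable (Spec_choose_primary_indicator indicators_list out) := by unfold Spec_choose_primary_indicator; infer_instance

-- ===== CLAIM (what is proved, stated in full; the proofs are below) =====
def Claim_equal_choose_primary_indicator : Prop := ∀ (indicators_list : List String), Dom_choose_primary_indicator indicators_list → Spec_choose_primary_indicator indicators_list (choose_primary_indicator indicators_list)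

-- ===== LEMMAS AND PROOFS =====

-- the generic result of each side, parametrised by the priority list
def pvResA (prio inds : List String) : String :=
  match pvLoopA prio inds with
  | some it => it
  | none => match inds with | [] => "" | x :: _ => x

def pvResB (prio inds : List String) : String :=
  match pvGoB prio inds prio.length none with
  | (br, some best) =>
    if br < prio.length then best
    else match inds with | [] => "" | x :: _ => x
  | (_, none) => match inds with | [] => "" | x :: _ => x

theorem pvGoB_zero (prio inds : List String) (b : Option String) :
    pvGoB prio inds 0 b = (0, b) := by
  induction inds with
  | nil => rfl
  | cons it rest ih => simp [pvGoB, ih]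

-- once some indicator contains p, the pass over (p :: ps) locks onto the first such indicator
theorem pvGoB_found (p : String) (ps inds : List String) (it₀ : String)
    (h : pvInnerA p inds = some it₀) :
    ∀ br b, 0 < br → pvGoB (p :: ps) inds br b = (0, some it₀) := by
  induction inds with
  | nil => simp [pvInnerA] at h
  | cons it rest ih =>
    intro br b hbr
    by_cases hc : PySem.Str.isIn p it
    all_goals simp only [PySem.Str.isIn] at hc
    · simp [pvInnerA, hc] at h
      subst h
      simp [pvGoB, pvRank, hc, hbr, pvGoB_zero]
    · simp [pvInnerA, hc] at h
      have hr : pvRank (p :: ps) it = pvRank ps it + 1 := by simp [pvRank, hc]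
      by_cases hlt : pvRank (p :: ps) it < br
      · simp [pvGoB, hlt]
        exact ih h _ _ (by omega)
      · simp [pvGoB, hlt]
        exact ih h _ _ hbr
  
-- if no indicator contains p, ranks w.r.t. (p :: ps) are all shifted by one
theorem pvGoB_shift (p : String) (ps : List String) (inds : List String)
    (h : ∀ it ∈ inds, ¬ PySem.Str.isIn p it) :
    ∀ br b, pvGoB (p :: ps) inds (br + 1) b =
      ((pvGoB ps inds br b).1 + 1, (pvGoB ps inds br b).2) := by
  induction inds with
  | nil => intro br b; rfl
  | cons it rest ih =>
    intro br b
    have hc : ¬ PySem.Chars.isIn p.toList it.toList = true := by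
      have := h it (by simp); simpa [PySem.Str.isIn] using this
    have hr : pvRank (p :: ps) it = pvRank ps it + 1 := by simp [pvRank, hc]
    have h' : ∀ x ∈ rest, ¬ PySem.Str.isIn p x := fun x hx => h x (by simp [hx])
    by_cases hlt : pvRank ps it < br
    · simp only [pvGoB, hr, ih h']
      rw [if_pos (by omega), if_pos hlt]
    · simp only [pvGoB, hr, ih h']
      rw [if_neg (by omega), if_neg hlt]

theorem pvInnerA_none (p : String) (inds : List String)
    (h : pvInnerA p inds = none) : ∀ it ∈ inds, ¬ PySem.Str.isIn p it := by
  induction inds with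
  | nil => simp
  | cons it rest ih =>
    intro x hx
    by_cases hc : PySem.Str.isIn p it
    all_goals simp only [PySem.Str.isIn] at hc
    · simp [pvInnerA, hc] at h
    · simp [pvInnerA, hc] at h
      rcases List.mem_cons.mp hx with hx | hx
      · subst hx; simpa [PySem.Str.isIn] using hc
      · exact ih h x hx

theorem pvRes_eq (prio inds : List String) : pvResA prio inds = pvResB prio inds := by
  induction prio with
  | nil =>
    simp [pvResA, pvResB, pvLoopA, pvGoB_zero]
  | cons p ps ih =>
    cases hin : pvInnerA p inds with
    | some it₀ =>
      have hgo := pvGoB_found p ps inds it₀ hin (ps.length + 1) none (by omega)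
      simp [pvResA, pvResB, pvLoopA, hin, hgo]
    | none =>
      have hall := pvInnerA_none p inds hin
      have hsh := pvGoB_shift p ps inds hall ps.length none
      simp only [pvResA, pvResB, pvLoopA, hin] at *
      rw [show (p :: ps).length = ps.length + 1 from rfl, hsh]
      cases hgo : pvGoB ps inds ps.length none with
      | mk br b =>
        cases b with
        | none => simpa [pvResB, hgo] using ih
        | some best =>
          have hiff : br + 1 < ps.length + 1 ↔ br < ps.length := by omega
          by_cases hlt : br < ps.length
          · simpa [pvResB, hgo, hlt, hiff] using ih
          · simpa [pvResB, hgo, hlt, hiff] using ih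

-- ===== VERDICT (by name: the statement is the Claim_ definition above) =====
theorem choose_primary_indicator_spec : Claim_equal_choose_primary_indicator := by
  intro inds _
  show choose_primary_indicator inds = choose_primary_indicator_alt inds
  have h := pvRes_eq pvPriority inds
  simpa [pvResA, pvResB, choose_primary_indicator, choose_primary_indicator_alt] using h
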